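-- pv_equiv track=rewrite | github.com/khseon7/CodingTest | 백준/Gold/1074. Z/Z.py | find
-- ===== SOURCE A (Python) =====
-- def find(n,r,c):
--     if n==2:
--         return r*2+c
--     semi=n//2
--     if r<semi and c<semi:
--         return find(semi,r,c)
--     elif r<semi and c>=semi:
--         return semi**2+find(semi,r,c-semi)
--     elif r>=semi and c<semi:
--         return (semi**2)*2+find(semi,r-semi,c)
--     else:
--         return (semi**2)*3+find(semi,r-semi,c-semi)
-- ===== SOURCE B (Python) =====
-- def find(n, r, c):
--     acc = 0
--     while n > 2:
--         semi = n // 2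
--         acc += (2 * (r >= semi) + (c >= semi)) * semi * semi
--         if r >= semi:
--             r -= semi
--         if c >= semi:
--             c -= semi
--         n = semi
--     return acc + r * 2 + c
-- ===== Notes on version B (the rewrite author's own statement) =====
-- stated objective: simpler
-- what changed: Replaces the four-branch recursion with a flat iterative while-loop that computes the quadrant number q = 2*(r>=semi)+(c>=semi) arithmetically and accumulates q*semi^2, returning r*2+c at the end.
import Mathlib
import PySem

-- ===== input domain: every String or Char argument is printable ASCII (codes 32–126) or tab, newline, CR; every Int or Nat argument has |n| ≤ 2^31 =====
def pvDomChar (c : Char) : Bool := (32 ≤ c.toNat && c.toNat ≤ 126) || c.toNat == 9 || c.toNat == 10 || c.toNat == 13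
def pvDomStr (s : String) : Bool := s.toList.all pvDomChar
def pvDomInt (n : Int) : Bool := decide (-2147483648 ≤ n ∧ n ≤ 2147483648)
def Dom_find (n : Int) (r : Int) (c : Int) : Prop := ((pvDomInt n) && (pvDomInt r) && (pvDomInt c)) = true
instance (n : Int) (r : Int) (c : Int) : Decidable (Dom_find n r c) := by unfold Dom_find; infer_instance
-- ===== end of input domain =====

-- B replaces A's four-branch recursion by a flat quadrant-arithmetic loop (objective: simpler).

-- ===== PORT A =====
-- A's recursion has no base case below n=2, so the transliteration carries a fuel
-- counter (totality device only; fuel n.toNat+1 exceeds the recursion depth on every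
-- input on which the Python returns).
def findFuelA (fuel : Nat) (n : Int) (r : Int) (c : Int) : Int :=
  match fuel with
  | 0 => 0
  | fuel + 1 =>
    if n = 2 then r * 2 + c
    else
      let semi := PySem.Int.floordiv n 2
      if r < semi ∧ c < semi then findFuelA fuel semi r c
      else if r < semi ∧ c ≥ semi then semi ^ 2 + findFuelA fuel semi r (c - semi)
      else if r ≥ semi ∧ c < semi then (semi ^ 2) * 2 + findFuelA fuel semi (r - semi) c
      else (semi ^ 2) * 3 + findFuelA fuel semi (r - semi) (c - semi)

def find (n : Int) (r : Int) (c : Int) : Int := findFuelA (n.toNat + 1) n r c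

-- ===== PORT B =====
-- transliteration of Source B's while-loop; state (n, r, c, acc); the fuel counter is a
-- totality device only (fuel n.toNat exceeds the number of iterations on every input).
def findLoopB : Nat → Int → Int → Int → Int → Int
  | 0, _, r, c, acc => acc + r * 2 + c
  | fuel + 1, n, r, c, acc =>
    if n > 2 then
      let semi := PySem.Int.floordiv n 2
      findLoopB fuel semi (if r ≥ semi then r - semi else r) (if c ≥ semi then c - semi else c)
        (acc + (2 * (if r ≥ semi then 1 else 0) + (if c ≥ semi then 1 else 0)) * semi * semi)
    else acc + r * 2 + c

def find_alt (n : Int) (r : Int) (c : Int) : Int := findLoopB n.toNat n r c 0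

-- ===== PRECONDITION & SPEC =====
-- Pre_find excludes exactly the grid sizes n on which A never RETURNS: repeated floor
-- halving of n must reach exactly 2 (i.e. n lies in [2^k, 3·2^(k-1)) for its bit length
-- k+1), otherwise A recurses forever and raises RecursionError (e.g. n=1, n=3, n=6).
def Pre_find (n : Int) (r : Int) (c : Int) : Prop :=
  2 ≤ n ∧ n.toNat < 3 * 2 ^ (n.toNat.log2 - 1)
instance (n : Int) (r : Int) (c : Int) : Decidable (Pre_find n r c) := by
  unfold Pre_find; infer_instance

def pvWitness_find : Int × Int × Int := (4, 1, 2)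

def Spec_find (n : Int) (r : Int) (c : Int) (out : Int) : Prop := out = find_alt n r c
instance (n : Int) (r : Int) (c : Int) (out : Int) : Decidable (Spec_find n r c out) := by
  unfold Spec_find; infer_instance

-- ===== CLAIM (what is proved, stated in full; the proofs are below) =====
def Claim_equal_find : Prop :=
  ∀ (n : Int) (r : Int) (c : Int), Dom_find n r c → Pre_find n r c → Spec_find n r c (find n r c)

-- ===== LEMMAS AND PROOFS =====

-- On n ∈ [2^(k+1), 3·2^k), B's loop with any sufficient fuel computes acc + A's recursion.
lemma findLoopB_eq (k : Nat) :
    ∀ (fA fB : Nat) (n r c acc : Int), k + 1 ≤ fA → k + 1 ≤ fB →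
      (2 : Int) ^ (k + 1) ≤ n → n < 3 * 2 ^ k →
      findLoopB fB n r c acc = acc + findFuelA fA n r c := by
  induction k with
  | zero =>
    intro fA fB n r c acc hfA hfB h1 h2
    have h1' : (2 : Int) ≤ n := by simpa using h1
    have h2' : n < 3 := by simpa using h2
    have hn : n = 2 := by omega
    subst hn
    obtain ⟨fA, rfl⟩ : ∃ f', fA = f' + 1 := ⟨fA - 1, by omega⟩
    rw [findFuelA]
    cases fB <;> simp [findLoopB] <;> ring
  | succ k ih =>
    intro fA fB n r c acc hfA hfB h1 h2
    obtain ⟨fA, rfl⟩ : ∃ f', fA = f' + 1 := ⟨fA - 1, by omega⟩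
    obtain ⟨fB, rfl⟩ : ∃ f', fB = f' + 1 := ⟨fB - 1, by omega⟩
    have hp : (0:Int) < 2 ^ (k+1) := by positivity
    have hn2 : n > 2 := by
      have : (2:Int) ^ (k+1+1) ≥ 4 := by
        calc (4:Int) = 2^2 := by norm_num
        _ ≤ 2 ^ (k+1+1) := by
          apply pow_le_pow_right₀ <;> omega
      omega
    have hne : n ≠ 2 := by omega
    rw [findLoopB, findFuelA]
    rw [if_pos hn2, if_neg hne]
    set semi := PySem.Int.floordiv n 2 with hsemi
    have hsd : semi = n / 2 := PySem.Int.floordiv_eq_ediv_of_pos (by norm_num)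
    have hb1 : (2:Int) ^ (k+1) ≤ semi := by
      rw [hsd]
      have : (2:Int) ^ (k+1+1) = 2 * 2 ^ (k+1) := by ring
      omega
    have hb2 : semi < 3 * 2 ^ k := by
      rw [hsd]
      have : (3:Int) * 2 ^ (k+1) = 2 * (3 * 2 ^ k) := by ring
      omega
    by_cases hr : r < semi <;> by_cases hc : c < semi
    · rw [if_pos ⟨hr, hc⟩]
      simp only [if_neg (show ¬ r ≥ semi by omega), if_neg (show ¬ c ≥ semi by omega)]
      rw [ih fA fB _ _ _ _ (by omega) (by omega) hb1 hb2]
      ring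
    · rw [if_neg (show ¬ (r < semi ∧ c < semi) by omega),
          if_pos (show r < semi ∧ c ≥ semi by omega)]
      simp only [if_neg (show ¬ r ≥ semi by omega), if_pos (show c ≥ semi by omega)]
      rw [ih fA fB _ _ _ _ (by omega) (by omega) hb1 hb2]
      ring
    · rw [if_neg (show ¬ (r < semi ∧ c < semi) by omega),
          if_neg (show ¬ (r < semi ∧ c ≥ semi) by omega),
          if_pos (show r ≥ semi ∧ c < semi by omega)]
      simp only [if_pos (show r ≥ semi by omega), if_neg (show ¬ c ≥ semi by omega)]
      rw [ih fA fB _ _ _ _ (by omega) (by omega) hb1 hb2]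
      ring
    · rw [if_neg (show ¬ (r < semi ∧ c < semi) by omega),
          if_neg (show ¬ (r < semi ∧ c ≥ semi) by omega),
          if_neg (show ¬ (r ≥ semi ∧ c < semi) by omega)]
      simp only [if_pos (show r ≥ semi by omega), if_pos (show c ≥ semi by omega)]
      rw [ih fA fB _ _ _ _ (by omega) (by omega) hb1 hb2]
      ring

-- Pre_find n r c gives the interval form: n ∈ [2^(k+1), 3·2^k) with k = n.toNat.log2 - 1.
lemma pre_interval {n : Int} (h2 : 2 ≤ n) (hlt : n.toNat < 3 * 2 ^ (n.toNat.log2 - 1)) :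
    ∃ k : Nat, (2 : Int) ^ (k + 1) ≤ n ∧ n < 3 * 2 ^ k := by
  set m := n.toNat with hm
  have hm2 : 2 ≤ m := by omega
  have hlog1 : 1 ≤ m.log2 := (Nat.le_log2 (by omega)).mpr (by simpa using hm2)
  refine ⟨m.log2 - 1, ?_, ?_⟩
  · have hle : 2 ^ m.log2 ≤ m := Nat.log2_self_le (by omega)
    have hks : m.log2 - 1 + 1 = m.log2 := by omega
    rw [hks]
    have : ((2 : Int)) ^ m.log2 ≤ (m : Int) := by exact_mod_cast hle
    omega
  · have : (m : Int) < 3 * 2 ^ (m.log2 - 1) := by exact_mod_cast hlt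
    omega

-- ===== VERDICT (by name: the statement is the Claim_ definition above) =====
theorem find_spec : Claim_equal_find := by
  intro n r c hDom hPre
  obtain ⟨h2, hlt⟩ := hPre
  obtain ⟨k, h1, h2'⟩ := pre_interval h2 hlt
  unfold Spec_find find find_alt
  have hA : (k + 1 : Nat) < 2 ^ (k + 1) := Nat.lt_two_pow_self
  have hB : ((k : Int) + 1) < 2 ^ (k + 1) := by exact_mod_cast hA
  have hkn : ((k : Int) + 1) < n := hB.trans_le h1
  rw [findLoopB_eq k (n.toNat + 1) n.toNat n r c 0 (by omega) (by omega) h1 h2']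
  ring
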